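-- pv_equiv track=rewrite | github.com/BlackOtto9911/kronecker_algorithm | kronecker_algorithm_ver_4.py | check_constant_term_division
-- ===== SOURCE A (Python) =====
-- def check_constant_term_division(x, y, const):
--     numerator = 0
--     denominator = 1
--     n = len(x)
--
--     # вычисляем все знаменатели
--     denominators = []
--     for i in range(n):
--         d = 1
--         for j in range(n):
--             if i != j:
--                 d *= (x[i] - x[j])
--         denominators.append(d)
--
--     # собираем общий знаменатель для всех дробей
--     for d in denominators: denominator *= d
--
--     # собираем числитель
--     for i in range(n):
--         term_num = y[i]
--         for j in range(n):
--             if i != j: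
--                 term_num *= (-x[j])
--         term_num *= denominator // denominators[i]
--         numerator += term_num
--
--     if numerator % denominator != 0: return False
--
--     const_int = numerator // denominator
--
--     if const_int == 0: return False
--     if const % const_int != 0: return False
--
--     return True
-- ===== SOURCE B (Python) =====
-- def check_constant_term_division(x, y, const):
--     # Accumulate the interpolated constant term as one running exact fraction
--     # num/den instead of A's denominators list + common denominator + scaling.
--     num, den = 0, 1
--     for i, xi in enumerate(x):
--         d, t = 1, y[i]
--         for j, xj in enumerate(x):
--             if j != i:
--                 d *= xi - xj
--                 t *= -xj
--         num, den = num * d + t * den, den * d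
--     if num % den != 0:
--         return False
--     c = num // den
--     return c != 0 and const % c == 0
-- ===== Notes on version B (the rewrite author's own statement) =====
-- stated objective: simpler
-- what changed: B drops A's denominators list, common-denominator product and per-term 'denominator // denominators[i]' scaling, instead fusing everything into one pass that accumulates the constant term as a single running exact fraction num/den (num,den = num*d + t*den, den*d).
import Mathlib
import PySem

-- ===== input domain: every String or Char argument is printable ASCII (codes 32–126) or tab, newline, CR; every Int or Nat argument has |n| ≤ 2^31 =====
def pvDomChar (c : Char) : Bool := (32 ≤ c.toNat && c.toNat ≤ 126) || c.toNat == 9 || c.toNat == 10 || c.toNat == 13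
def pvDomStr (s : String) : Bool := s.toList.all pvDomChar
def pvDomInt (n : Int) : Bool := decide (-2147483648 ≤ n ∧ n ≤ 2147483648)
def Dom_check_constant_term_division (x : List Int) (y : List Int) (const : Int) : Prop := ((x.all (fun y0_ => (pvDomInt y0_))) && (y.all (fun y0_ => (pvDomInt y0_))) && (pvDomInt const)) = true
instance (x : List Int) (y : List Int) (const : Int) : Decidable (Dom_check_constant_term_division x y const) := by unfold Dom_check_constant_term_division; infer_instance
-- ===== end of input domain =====

-- B replaces A's denominators list + common denominator + per-term scaling division by one
-- fused pass accumulating the constant term as a running exact fraction (return value only).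

-- ===== PORT A =====
def check_constant_term_division (x : List Int) (y : List Int) (const : Int) : Bool :=
  let n : Int := x.length
  let denominators : List Int := (PySem.List.pyRange 0 n 1).foldl (fun acc i =>
    acc ++ [(PySem.List.pyRange 0 n 1).foldl (fun d j =>
      if i ≠ j then d * (PySem.List.pyGetD x i 0 - PySem.List.pyGetD x j 0) else d) 1]) []
  let denominator : Int := denominators.foldl (fun acc d => acc * d) 1
  let numerator : Int := (PySem.List.pyRange 0 n 1).foldl (fun num i =>
    num + ((PySem.List.pyRange 0 n 1).foldl (fun t j =>
      if i ≠ j then t * (-(PySem.List.pyGetD x j 0)) else t) (PySem.List.pyGetD y i 0))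
      * PySem.Int.floordiv denominator (PySem.List.pyGetD denominators i 0)) 0
  if PySem.Int.mod numerator denominator ≠ 0 then false
  else
    let const_int := PySem.Int.floordiv numerator denominator
    if const_int = 0 then false
    else if PySem.Int.mod const const_int ≠ 0 then false
    else true

-- ===== PORT B =====
def check_constant_term_division_alt (x : List Int) (y : List Int) (const : Int) : Bool :=
  let nd : Int × Int := (PySem.List.enumerate x).foldl (fun p ix =>
    let dt : Int × Int := (PySem.List.enumerate x).foldl (fun q jx =>
      if jx.1 ≠ ix.1 then (q.1 * (ix.2 - jx.2), q.2 * (-jx.2)) else q)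
      (1, PySem.List.pyGetD y ix.1 0)
    (p.1 * dt.1 + dt.2 * p.2, p.2 * dt.1)) (0, 1)
  if PySem.Int.mod nd.1 nd.2 ≠ 0 then false
  else
    let c := PySem.Int.floordiv nd.1 nd.2
    decide (c ≠ 0) && decide (PySem.Int.mod const c = 0)

-- ===== PRECONDITION & SPEC =====
-- Pre_ excludes exactly the inputs on which A raises: duplicate x values (ZeroDivisionError
-- from a zero denominator) and y shorter than x (IndexError at y[i]).
def Pre_check_constant_term_division (x : List Int) (y : List Int) (const : Int) : Prop :=
  x.Nodup ∧ x.length ≤ y.length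
instance (x : List Int) (y : List Int) (const : Int) : Decidable (Pre_check_constant_term_division x y const) := by unfold Pre_check_constant_term_division; infer_instance
def pvWitness_check_constant_term_division : List Int × List Int × Int := ([0, 2], [4, 6], 4)

def Spec_check_constant_term_division (x : List Int) (y : List Int) (const : Int) (out : Bool) : Prop := out = check_constant_term_division_alt x y const
instance (x : List Int) (y : List Int) (const : Int) (out : Bool) : Decidable (Spec_check_constant_term_division x y const out) := by unfold Spec_check_constant_term_division; infer_instance

-- ===== CLAIM (what is proved, stated in full; the proofs are below) =====
def Claim_equal_check_constant_term_division : Prop := ∀ (x : List Int) (y : List Int) (const : Int), Dom_check_constant_term_division x y const → Pre_check_constant_term_division x y const → Spec_check_constant_term_division x y const (check_constant_term_division x y const)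

-- ===== LEMMAS AND PROOFS =====

-- d_i and t_i as A's inner folds over range(n)
def pvD (x : List Int) (i : Int) : Int :=
  (PySem.List.pyRange 0 (x.length : Int) 1).foldl (fun d j =>
    if i ≠ j then d * (PySem.List.pyGetD x i 0 - PySem.List.pyGetD x j 0) else d) 1
def pvT (x : List Int) (y : List Int) (i : Int) : Int :=
  (PySem.List.pyRange 0 (x.length : Int) 1).foldl (fun t j =>
    if i ≠ j then t * (-(PySem.List.pyGetD x j 0)) else t) (PySem.List.pyGetD y i 0)

-- recursive product / cross-sum of a list of (d, t) pairs
def pvP : List (Int × Int) → Int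
  | [] => 1
  | e :: l => e.1 * pvP l
def pvN : List (Int × Int) → Int
  | [] => 0
  | e :: l => e.2 * pvP l + e.1 * pvN l

theorem pv_exact_floordiv (b m : Int) (hb : b ≠ 0) : PySem.Int.floordiv (b * m) b = m := by
  have h := PySem.Int.floordiv_mul_add_mod (b * m) b
  have hmod : PySem.Int.mod (b * m) b = 0 :=
    (PySem.Int.mod_eq_zero_iff_dvd _ _).mpr ⟨m, rfl⟩
  rw [hmod, add_zero] at h
  have := mul_right_cancel₀ hb (h.trans (mul_comm b m))
  exact this

theorem pv_P_map (f g : Int → Int) (l : List Int) :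
    pvP (l.map (fun i => (f i, g i))) = (l.map f).prod := by
  induction l with
  | nil => simp [pvP]
  | cons a l ih => simp [pvP, ih]

theorem pv_N_map (f g : Int → Int) (l : List Int) (hl : l.Nodup) :
    pvN (l.map (fun i => (f i, g i)))
      = (l.map (fun i => g i * ((l.erase i).map f).prod)).sum := by
  induction l with
  | nil => simp [pvN]
  | cons a l ih =>
    have ha : a ∉ l := (List.nodup_cons.mp hl).1
    have hl' : l.Nodup := (List.nodup_cons.mp hl).2
    simp only [List.map_cons, pvN, pv_P_map, List.sum_cons, List.erase_cons_head]
    rw [ih hl']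
    congr 1
    have h1 : ∀ i ∈ l, g i * ((((a :: l).erase i)).map f).prod
        = f a * (g i * ((l.erase i).map f).prod) := by
      intro i hi
      have hia : i ≠ a := fun h => ha (h ▸ hi)
      rw [List.erase_cons_tail (by simp; exact fun h => hia h.symm)]
      simp only [List.map_cons, List.prod_cons]
      ring
    rw [List.map_congr_left h1, List.sum_map_mul_left]

theorem pv_fold_ne_zero (l : List Int) (c : Int → Prop) [DecidablePred c] (h : Int → Int)
    (init : Int) (h0 : init ≠ 0) (hf : ∀ j ∈ l, c j → h j ≠ 0) :
    l.foldl (fun d j => if c j then d * h j else d) init ≠ 0 := by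
  induction l generalizing init with
  | nil => simpa
  | cons a l ih =>
    simp only [List.foldl_cons]
    by_cases hc : c a
    · simp only [hc, if_pos]
      exact ih _ (mul_ne_zero h0 (hf a (List.mem_cons_self) hc))
        (fun j hj hcj => hf j (List.mem_cons_of_mem _ hj) hcj)
    · simp only [hc, if_neg, not_false_iff]
      exact ih _ h0 (fun j hj hcj => hf j (List.mem_cons_of_mem _ hj) hcj)

theorem pv_D_ne_zero (x : List Int) (hx : x.Nodup) (i : Int)
    (hi : i ∈ PySem.List.pyRange 0 (x.length : Int) 1) : pvD x i ≠ 0 := by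
  unfold pvD
  apply pv_fold_ne_zero
  · exact one_ne_zero
  · intro j hj hij
    rw [PySem.List.mem_pyRange_one] at hi hj
    rw [PySem.List.pyGetD_eq_getElem x 0 hi.1 hi.2,
        PySem.List.pyGetD_eq_getElem x 0 hj.1 hj.2]
    intro hzero
    have hEq := sub_eq_zero.mp hzero
    have : i.toNat = j.toNat := (List.Nodup.getElem_inj_iff hx).mp hEq
    exact hij (by omega)

-- the common final guard sequence, in A's shape
def pvFinal (N D const : Int) : Bool :=
  if PySem.Int.mod N D ≠ 0 then false
  else
    let c := PySem.Int.floordiv N D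
    if c = 0 then false
    else if PySem.Int.mod const c ≠ 0 then false
    else true

def pvL (x y : List Int) : List (Int × Int) :=
  (PySem.List.pyRange 0 (x.length : Int) 1).map (fun i => (pvD x i, pvT x y i))

theorem pv_final_eq (N D const : Int) :
    pvFinal N D const
      = (if PySem.Int.mod N D ≠ 0 then false
         else decide (PySem.Int.floordiv N D ≠ 0)
              && decide (PySem.Int.mod const (PySem.Int.floordiv N D) = 0)) := by
  unfold pvFinal
  split_ifs <;> simp_all

theorem pv_genA (n : Nat) (dF tF : Int → Int) (const : Int)
    (hd : ∀ i ∈ PySem.List.pyRange 0 (n : Int) 1, dF i ≠ 0) :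
    (let nn : Int := n
     let denominators : List Int := (PySem.List.pyRange 0 nn 1).foldl (fun acc i => acc ++ [dF i]) []
     let denominator : Int := denominators.foldl (fun acc d => acc * d) 1
     let numerator : Int := (PySem.List.pyRange 0 nn 1).foldl (fun num i =>
        num + tF i * PySem.Int.floordiv denominator (PySem.List.pyGetD denominators i 0)) 0
     if PySem.Int.mod numerator denominator ≠ 0 then false
     else
       let const_int := PySem.Int.floordiv numerator denominator
       if const_int = 0 then false
       else if PySem.Int.mod const const_int ≠ 0 then false
       else true)
    = pvFinal (pvN ((PySem.List.pyRange 0 (n : Int) 1).map fun i => (dF i, tF i)))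
        (pvP ((PySem.List.pyRange 0 (n : Int) 1).map fun i => (dF i, tF i))) const := by
  have hR : (PySem.List.pyRange 0 (n : Int) 1).Nodup := PySem.List.nodup_pyRange_one 0 _
  simp only [PySem.List.foldl_append_singleton_eq_map, List.nil_append]
  have hprod : ((PySem.List.pyRange 0 (n : Int) 1).map dF).foldl (fun acc d => acc * d) 1
      = pvP ((PySem.List.pyRange 0 (n : Int) 1).map fun i => (dF i, tF i)) := by
    rw [pv_P_map, List.prod_eq_foldl]
  rw [hprod]
  have hnum : (PySem.List.pyRange 0 (n : Int) 1).foldl (fun num i =>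
      num + tF i * PySem.Int.floordiv
        (pvP ((PySem.List.pyRange 0 (n : Int) 1).map fun i => (dF i, tF i)))
        (PySem.List.pyGetD ((PySem.List.pyRange 0 (n : Int) 1).map dF) i 0)) 0
      = pvN ((PySem.List.pyRange 0 (n : Int) 1).map fun i => (dF i, tF i)) := by
    rw [PySem.List.foldl_add _ (fun i => tF i * PySem.Int.floordiv
        (pvP ((PySem.List.pyRange 0 (n : Int) 1).map fun i => (dF i, tF i)))
        (PySem.List.pyGetD ((PySem.List.pyRange 0 (n : Int) 1).map dF) i 0)) 0, zero_add]
    have hpt : ∀ i ∈ PySem.List.pyRange 0 (n : Int) 1,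
        tF i * PySem.Int.floordiv
          (pvP ((PySem.List.pyRange 0 (n : Int) 1).map fun i => (dF i, tF i)))
          (PySem.List.pyGetD ((PySem.List.pyRange 0 (n : Int) 1).map dF) i 0)
        = tF i * (((PySem.List.pyRange 0 (n : Int) 1).erase i).map dF).prod := by
      intro i hi
      have hb := PySem.List.mem_pyRange_one.mp hi
      rw [PySem.List.pyGetD_map_pyRange_of_nonneg dF _ i 0 hb.1 hb.2, pv_P_map,
          ← List.prod_map_erase dF hi, pv_exact_floordiv _ _ (hd i hi)]
    rw [List.map_congr_left hpt, ← pv_N_map dF tF _ hR]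
  rw [hnum]
  rfl

theorem pv_A_eq (x y : List Int) (const : Int) (hx : x.Nodup) :
    check_constant_term_division x y const
      = pvFinal (pvN (pvL x y)) (pvP (pvL x y)) const :=
  pv_genA x.length (pvD x) (pvT x y) const (fun i hi => pv_D_ne_zero x hx i hi)

theorem pv_pair_fold (l : List Int) (i : Int) (f g : Int → Int) (a b : Int) :
    l.foldl (fun (q : Int × Int) j => if j ≠ i then (q.1 * f j, q.2 * g j) else q) (a, b)
      = (l.foldl (fun d j => if i ≠ j then d * f j else d) a,
         l.foldl (fun t j => if i ≠ j then t * g j else t) b) := by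
  induction l generalizing a b with
  | nil => rfl
  | cons c l ih =>
    simp only [List.foldl_cons]
    by_cases h : c = i
    · subst h
      rw [if_neg (by simp), if_neg (by simp), if_neg (by simp)]
      exact ih a b
    · rw [if_pos h, if_pos (fun e => h e.symm), if_pos (fun e => h e.symm)]
      exact ih _ _

theorem pv_B_outer (l : List Int) (dF tF : Int → Int) (a b : Int) :
    l.foldl (fun (p : Int × Int) i => (p.1 * dF i + tF i * p.2, p.2 * dF i)) (a, b)
      = (a * pvP (l.map fun i => (dF i, tF i)) + b * pvN (l.map fun i => (dF i, tF i)),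
         b * pvP (l.map fun i => (dF i, tF i))) := by
  induction l generalizing a b with
  | nil => simp [pvP, pvN]
  | cons c l ih =>
    simp only [List.foldl_cons, List.map_cons, pvP, pvN, ih, Prod.mk.injEq]
    constructor <;> ring

theorem pv_B_eq (x y : List Int) (const : Int) :
    check_constant_term_division_alt x y const
      = (if PySem.Int.mod (pvN (pvL x y)) (pvP (pvL x y)) ≠ 0 then false
         else decide (PySem.Int.floordiv (pvN (pvL x y)) (pvP (pvL x y)) ≠ 0)
              && decide (PySem.Int.mod const
                  (PySem.Int.floordiv (pvN (pvL x y)) (pvP (pvL x y))) = 0)) := by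
  simp only [check_constant_term_division_alt]
  rw [PySem.List.enumerate_eq_map_pyRange x 0]
  simp only [List.foldl_map, PySem.List.len]
  have hbody : ∀ (p : Int × Int), ∀ i ∈ PySem.List.pyRange 0 (x.length : Int) 1,
      (p.1 * ((PySem.List.pyRange 0 (x.length : Int) 1).foldl
          (fun (q : Int × Int) j => if j ≠ i
            then (q.1 * (PySem.List.pyGetD x i 0 - PySem.List.pyGetD x j 0),
                  q.2 * (-(PySem.List.pyGetD x j 0))) else q)
          (1, PySem.List.pyGetD y i 0)).1
        + ((PySem.List.pyRange 0 (x.length : Int) 1).foldl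
          (fun (q : Int × Int) j => if j ≠ i
            then (q.1 * (PySem.List.pyGetD x i 0 - PySem.List.pyGetD x j 0),
                  q.2 * (-(PySem.List.pyGetD x j 0))) else q)
          (1, PySem.List.pyGetD y i 0)).2 * p.2,
       p.2 * ((PySem.List.pyRange 0 (x.length : Int) 1).foldl
          (fun (q : Int × Int) j => if j ≠ i
            then (q.1 * (PySem.List.pyGetD x i 0 - PySem.List.pyGetD x j 0),
                  q.2 * (-(PySem.List.pyGetD x j 0))) else q)
          (1, PySem.List.pyGetD y i 0)).1)
      = (p.1 * pvD x i + pvT x y i * p.2, p.2 * pvD x i) := by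
    intro p i _
    rw [pv_pair_fold]
    rfl
  rw [PySem.List.foldl_congr_mem _ _
      (fun (p : Int × Int) (i : Int) => (p.1 * pvD x i + pvT x y i * p.2, p.2 * pvD x i))
      (0, 1) hbody]
  rw [pv_B_outer]
  simp only [zero_mul, one_mul, zero_add, pvL]
  rfl

-- ===== VERDICT (by name: the statement is the Claim_ definition above) =====
theorem check_constant_term_division_spec : Claim_equal_check_constant_term_division := by
  intro x y const _ hpre
  unfold Spec_check_constant_term_division
  rw [pv_A_eq x y const hpre.1, pv_final_eq, pv_B_eq]
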